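-- pv_equiv track=rewrite | github.com/Qiskit/qiskit | qiskit/result/utils.py | _format_marginal
-- ===== SOURCE A (Python) =====
-- def _format_marginal(counts, marg_counts, indices):
--     """Take the output of marginalize and add placeholders for
--     multiple cregs and non-indices."""
--     format_counts = {}
--     counts_template = next(iter(counts))
--     counts_len = len(counts_template.replace(" ", ""))
--     indices_rev = sorted(indices, reverse=True)
--
--     for count in marg_counts:
--         index_dict = dict(zip(indices_rev, count))
--         count_bits = "".join(
--             [index_dict[index] if index in index_dict else "_" for index in range(counts_len)]
--         )[::-1]
--         for index, bit in enumerate(counts_template):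
--             if bit == " ":
--                 count_bits = count_bits[:index] + " " + count_bits[index:]
--         format_counts[count_bits] = marg_counts[count]
--     return format_counts
-- ===== SOURCE B (Python) =====
-- def _format_marginal(counts, marg_counts, indices):
--     """Scatter instead of gather: precompute once, from the template, a blank
--     skeleton (spaces kept, other positions '_') and the template positions of
--     the bits MSB-first; then for each marginal key just write its bits into a
--     copy of the skeleton -- no per-key dict and no string re-slicing."""
--     format_counts = {}
--     counts_template = next(iter(counts))
--     skeleton = [" " if ch == " " else "_" for ch in counts_template]
--     slots = [k for k, ch in enumerate(counts_template) if ch != " "]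
--     counts_len = len(slots)
--     indices_rev = sorted(indices, reverse=True)
--
--     for count in marg_counts:
--         out = list(skeleton)
--         for idx, bit in zip(indices_rev, count):
--             if 0 <= idx < counts_len:
--                 out[slots[counts_len - 1 - idx]] = bit
--         format_counts["".join(out)] = marg_counts[count]
--     return format_counts
-- ===== Notes on version B (the rewrite author's own statement) =====
-- stated objective: simpler
-- what changed: B scatters: it precomputes once, from the template, a blank skeleton and the template positions of the bits (MSB first), then writes each marginal key's bits into a copy of the skeleton; A gathers per key through a position dict, reverses the joined string and re-slices it to insert a space at every template space.
import Mathlib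
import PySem

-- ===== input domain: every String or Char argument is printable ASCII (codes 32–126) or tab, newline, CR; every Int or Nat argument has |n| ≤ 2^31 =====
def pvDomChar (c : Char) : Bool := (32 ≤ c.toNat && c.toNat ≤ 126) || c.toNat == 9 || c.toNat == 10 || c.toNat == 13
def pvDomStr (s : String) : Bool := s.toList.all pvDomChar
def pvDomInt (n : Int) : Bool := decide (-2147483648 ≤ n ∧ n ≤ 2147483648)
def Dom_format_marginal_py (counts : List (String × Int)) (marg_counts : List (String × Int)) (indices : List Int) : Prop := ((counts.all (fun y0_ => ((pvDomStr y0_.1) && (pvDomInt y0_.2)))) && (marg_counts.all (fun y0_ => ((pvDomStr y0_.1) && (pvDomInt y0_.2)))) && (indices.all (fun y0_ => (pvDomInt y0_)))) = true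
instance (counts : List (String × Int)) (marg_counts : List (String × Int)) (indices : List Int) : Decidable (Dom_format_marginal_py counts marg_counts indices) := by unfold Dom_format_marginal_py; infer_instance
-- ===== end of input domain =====

-- B builds each key by scattering the marginal bits into a precomputed template skeleton
-- (spaces kept, other positions '_'), instead of A's gather-reverse-then-reslice-in-spaces
-- construction (objective: simpler). Return-value equivalence only; neither version mutates
-- its arguments.

-- ===== PORT A =====
def format_marginal_py (counts : List (String × Int)) (marg_counts : List (String × Int)) (indices : List Int) : List (String × Int) :=
  match counts with
  | [] => []  -- next(iter(counts)) raises StopIteration here; excluded by Pre_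
  | (counts_template, _) :: _ =>
    let counts_len : Int := PySem.Str.len (PySem.Str.replace counts_template " " "")
    let indices_rev : List Int := PySem.List.sorted indices (fun x => x) true
    let mdict : PySem.Dict String Int := PySem.Dict.ofList marg_counts
    let format_counts : PySem.Dict String Int :=
      mdict.items.foldl (fun (fc : PySem.Dict String Int) p =>
        let count := p.1
        let index_dict : PySem.Dict Int Char := PySem.Dict.ofList (indices_rev.zip count.toList)
        -- "".join([index_dict[i] if i in index_dict else "_" for i in range(counts_len)])[::-1]
        -- ([::-1] is reverse, cf. PySem.List.slice?_none_none_neg_one)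
        let count_bits : List Char :=
          ((PySem.List.pyRange 0 counts_len 1).map
            (fun index => if index_dict.contains index then index_dict.getD index '_' else '_')).reverse
        -- for index, bit in enumerate(counts_template): if bit == " ": insert a space
        let count_bits := (PySem.List.enumerate counts_template.toList 0).foldl
          (fun cb q =>
            if q.2 = ' ' then
              PySem.List.slice cb none (some q.1) ++ ' ' :: PySem.List.slice cb (some q.1) none
            else cb) count_bits
        fc.insert (String.ofList count_bits) (mdict.getD count 0))
        PySem.Dict.empty
    format_counts.items

-- ===== PORT B =====
def format_marginal_py_alt (counts : List (String × Int)) (marg_counts : List (String × Int)) (indices : List Int) : List (String × Int) :=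
  match counts with
  | [] => []  -- next(iter(counts)) raises StopIteration here; excluded by Pre_
  | (counts_template, _) :: _ =>
    -- skeleton = [" " if ch == " " else "_" for ch in counts_template]
    let skeleton : List Char := counts_template.toList.map (fun ch => if ch = ' ' then ' ' else '_')
    -- slots = [k for k, ch in enumerate(counts_template) if ch != " "]
    let slots : List Int :=
      ((PySem.List.enumerate counts_template.toList 0).filter (fun q => q.2 ≠ ' ')).map Prod.fst
    let counts_len : Int := (slots.length : Int)
    let indices_rev : List Int := PySem.List.sorted indices (fun x => x) true
    let mdict : PySem.Dict String Int := PySem.Dict.ofList marg_counts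
    let format_counts : PySem.Dict String Int :=
      mdict.items.foldl (fun (fc : PySem.Dict String Int) p =>
        -- out = list(skeleton); for idx, bit in zip(indices_rev, count): if 0 <= idx < counts_len: out[slots[counts_len-1-idx]] = bit
        let out : List Char := (indices_rev.zip p.1.toList).foldl
          (fun (out : List Char) (q : Int × Char) =>
            if 0 ≤ q.1 ∧ q.1 < counts_len then
              -- both indexings are provably in range under the guard (pyGetD/pySetD are exact)
              PySem.List.pySetD out (PySem.List.pyGetD slots (counts_len - 1 - q.1) 0) q.2
            else out)
          skeleton
        fc.insert (String.ofList out) (mdict.getD p.1 0))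
        PySem.Dict.empty
    format_counts.items

-- ===== PRECONDITION & SPEC =====
-- Pre_ excludes only counts = [] (empty dict), where the Python A (and B) raises StopIteration.
def Pre_format_marginal_py (counts : List (String × Int)) (marg_counts : List (String × Int)) (indices : List Int) : Prop :=
  counts ≠ []
instance (counts : List (String × Int)) (marg_counts : List (String × Int)) (indices : List Int) : Decidable (Pre_format_marginal_py counts marg_counts indices) := by unfold Pre_format_marginal_py; infer_instance

def pvWitness_format_marginal_py : (List (String × Int)) × (List (String × Int)) × List Int :=
  ([("10 1", 5)], [("01", 3)], [0, 2])

def Spec_format_marginal_py (counts : List (String × Int)) (marg_counts : List (String × Int)) (indices : List Int) (out : List (String × Int)) : Prop := out = format_marginal_py_alt counts marg_counts indices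
instance (counts : List (String × Int)) (marg_counts : List (String × Int)) (indices : List Int) (out : List (String × Int)) : Decidable (Spec_format_marginal_py counts marg_counts indices out) := by unfold Spec_format_marginal_py; infer_instance

-- ===== CLAIM (what is proved, stated in full; the proofs are below) =====
def Claim_equal_format_marginal_py : Prop := ∀ (counts : List (String × Int)) (marg_counts : List (String × Int)) (indices : List Int), Dom_format_marginal_py counts marg_counts indices → Pre_format_marginal_py counts marg_counts indices → Spec_format_marginal_py counts marg_counts indices (format_marginal_py counts marg_counts indices)

-- ===== LEMMAS AND PROOFS =====

-- the common normal form of one output key: a space where the template has one,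
-- otherwise f applied to the current bit position (descending)
def pvWalk (f : Int → Char) : List Char → Int → List Char
  | [], _ => []
  | c :: r, bp => if c = ' ' then ' ' :: pvWalk f r bp else f bp :: pvWalk f r (bp - 1)

-- B's slots list, as a proof-side name (definitionally the port's expression)
def pvSlots (tcs : List Char) : List Int :=
  ((PySem.List.enumerate tcs 0).filter (fun q => q.2 ≠ ' ')).map Prod.fst

-- ---------- A-side: the gather-reverse-insert construction is pvWalk ----------

-- replace(s, " ", "") is filter (· ≠ ' ')
lemma pvReplaceGo (fuel : Nat) : ∀ (l acc : List Char), l.length ≤ fuel →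
    PySem.Chars.replace.go [' '] [] fuel l acc = acc.reverse ++ l.filter (fun c => c ≠ ' ') := by
  induction fuel with
  | zero =>
    intro l acc h
    have : l = [] := List.eq_nil_of_length_eq_zero (Nat.le_zero.mp h)
    subst this; simp [PySem.Chars.replace.go]
  | succ n ih =>
    intro l acc h
    match l with
    | [] => simp [PySem.Chars.replace.go]
    | c :: t =>
      by_cases hc : c = ' '
      · subst hc
        rw [show PySem.Chars.replace.go [' '] [] (n+1) (' ' :: t) acc
              = PySem.Chars.replace.go [' '] [] n t acc by
            simp [PySem.Chars.replace.go, List.isPrefixOf]]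
        rw [ih t acc (by simpa using Nat.lt_succ_iff.mp (by simpa using h))]
        simp
      · rw [show PySem.Chars.replace.go [' '] [] (n+1) (c :: t) acc
              = PySem.Chars.replace.go [' '] [] n t (c :: acc) by
            simp [PySem.Chars.replace.go, List.isPrefixOf, (by simpa using Ne.symm hc : (' ' == c) = false)]]
        rw [ih t (c :: acc) (by simpa using Nat.lt_succ_iff.mp (by simpa using h))]
        simp [hc]

lemma pvReplaceFilter (s : List Char) :
    PySem.Chars.replace s [' '] [] = s.filter (fun c => c ≠ ' ') := by
  rw [show PySem.Chars.replace s [' '] [] = PySem.Chars.replace.go [' '] [] s.length s [] by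
        simp [PySem.Chars.replace]]
  simpa using pvReplaceGo s.length s [] le_rfl

-- reversed [f 0, …, f (m-1)]  =  [f (m-1), f (m-2), …, f 0]  in the bp - j form
lemma pvRevRange (f : Int → Char) (m : Nat) :
    (List.map (fun (k : Nat) => f (k : Int)) (List.range m)).reverse
      = List.map (fun (j : Nat) => f ((m : Int) - 1 - (j : Int))) (List.range m) := by
  induction m with
  | zero => simp
  | succ n ih =>
    conv_lhs => rw [List.range_succ]
    conv_rhs => rw [List.range_succ_eq_map]
    simp only [List.map_append, List.map_cons, List.reverse_append, List.reverse_cons,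
      List.map_map]
    rw [ih]
    simp only [List.map_nil, List.reverse_nil, List.nil_append, List.cons_append]
    congr 1
    · congr 1; push_cast; ring
    · apply List.map_congr_left
      intro j _
      simp only [Function.comp_apply]
      congr 1
      push_cast; ring

-- A's space-insertion loop, run from a done-prefix invariant, is pvWalk
lemma pvInsWalk (f : Int → Char) : ∀ (tcs done pending : List Char) (bp : Int),
    pending = List.map (fun (j : Nat) => f (bp - (j : Int)))
        (List.range ((tcs.filter (fun c => c ≠ ' ')).length)) →
    (PySem.List.enumerate tcs (done.length : Int)).foldl
        (fun cb (q : Int × Char) =>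
          if q.2 = ' ' then
            PySem.List.slice cb none (some q.1) ++ ' ' :: PySem.List.slice cb (some q.1) none
          else cb) (done ++ pending)
      = done ++ pvWalk f tcs bp := by
  intro tcs
  induction tcs with
  | nil => intro done pending bp hp; simp at hp; simp [hp, PySem.List.enumerate, pvWalk]
  | cons c r ih =>
    intro done pending bp hp
    rw [PySem.List.enumerate_cons]
    by_cases hc : c = ' '
    · subst hc
      simp only [List.foldl_cons, reduceIte]
      rw [PySem.List.slice_to_natCast, PySem.List.slice_from_natCast,
        List.take_left, List.drop_left]
      have hlen : ((done.length : Int) + 1) = (((done ++ [' ']).length : Int)) := by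
        simp
      rw [hlen, show done ++ ' ' :: pending = (done ++ [' ']) ++ pending by simp]
      rw [ih (done ++ [' ']) pending bp (by simpa using hp)]
      simp [pvWalk]
    · simp only [List.foldl_cons, if_neg hc]
      have hfl : ((c :: r).filter (fun x => x ≠ ' ')).length
          = ((r.filter (fun x => x ≠ ' ')).length) + 1 := by
        simp [hc]
      rw [hfl] at hp
      rw [List.range_succ_eq_map] at hp
      simp only [List.map_cons, List.map_map] at hp
      have hp' : pending = f bp ::
          List.map (fun (j : Nat) => f ((bp - 1) - (j : Int)))
            (List.range ((r.filter (fun x => x ≠ ' ')).length)) := by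
        rw [hp]
        congr 1
        · norm_num
        · apply List.map_congr_left
          intro j _
          simp only [Function.comp_apply]
          congr 1
          push_cast; ring
      rw [hp', show done ++ f bp :: List.map (fun (j : Nat) => f ((bp - 1) - (j : Int)))
            (List.range ((r.filter (fun x => x ≠ ' ')).length))
          = (done ++ [f bp]) ++ List.map (fun (j : Nat) => f ((bp - 1) - (j : Int)))
            (List.range ((r.filter (fun x => x ≠ ' ')).length)) by simp]
      have hlen : ((done.length : Int) + 1) = (((done ++ [f bp]).length : Int)) := by simp
      rw [hlen, ih (done ++ [f bp]) _ (bp - 1) rfl]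
      simp [pvWalk, hc]

-- A's key string, abstractly: pvWalk of the index_dict lookup
lemma pvAKey (tpl : String) (d : PySem.Dict Int Char) :
    (PySem.List.enumerate tpl.toList 0).foldl
        (fun cb (q : Int × Char) =>
          if q.2 = ' ' then
            PySem.List.slice cb none (some q.1) ++ ' ' :: PySem.List.slice cb (some q.1) none
          else cb)
        (((PySem.List.pyRange 0 (PySem.Str.len (PySem.Str.replace tpl " " "")) 1).map
            (fun index => if d.contains index then d.getD index '_' else '_')).reverse)
      = pvWalk (fun i => d.getD i '_') tpl.toList
          (((tpl.toList.filter (fun c => c ≠ ' ')).length : Int) - 1) := by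
  set f : Int → Char := fun i => d.getD i '_' with hf
  have hrep : PySem.Str.len (PySem.Str.replace tpl " " "")
      = (((tpl.toList.filter (fun c => c ≠ ' ')).length : Nat) : Int) := by
    rw [PySem.Str.len_eq, PySem.Str.toList_replace]
    rw [show (" " : String).toList = [' '] from rfl, show ("" : String).toList = [] from rfl]
    rw [pvReplaceFilter]
  set m : Nat := (tpl.toList.filter (fun c => c ≠ ' ')).length with hm
  have hmapf : (PySem.List.pyRange 0 (PySem.Str.len (PySem.Str.replace tpl " " "")) 1).map
      (fun index => if d.contains index then d.getD index '_' else '_')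
      = List.map (fun (k : Nat) => f (k : Int)) (List.range m) := by
    rw [hrep, PySem.List.pyRange_one]
    simp only [Int.sub_zero, Int.toNat_natCast, List.map_map]
    apply List.map_congr_left
    intro k _
    simp only [Function.comp_apply, Int.zero_add, hf]
    by_cases hck : d.contains (k : Int)
    · simp [hck]
    · simp only [Bool.not_eq_true] at hck
      simp [hck, PySem.Dict.getD_of_not_contains d _ hck]
  rw [hmapf, pvRevRange]
  have h0 : (0 : Int) = (([] : List Char).length : Int) := by simp
  rw [h0, show (List.map (fun (j : Nat) => f ((m : Int) - 1 - (j : Int))) (List.range m))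
        = ([] : List Char) ++ (List.map (fun (j : Nat) => f (((m : Int) - 1) - (j : Int))) (List.range m)) by simp]
  rw [pvInsWalk f tpl.toList [] _ ((m : Int) - 1) (by rw [hm])]
  simp

-- ---------- B-side: the scatter fold is pvWalk ----------

-- the skeleton is pvWalk of the constant '_' function
lemma pvSkeleton (tcs : List Char) (bp : Int) :
    tcs.map (fun ch => if ch = ' ' then ' ' else '_') = pvWalk (fun _ => '_') tcs bp := by
  induction tcs generalizing bp with
  | nil => simp [pvWalk]
  | cons c r ih =>
    by_cases hc : c = ' '
    · simp only [List.map_cons, pvWalk, hc, reduceIte]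
      rw [ih bp]
    · simp only [List.map_cons, pvWalk, if_neg hc]
      rw [ih (bp - 1)]

-- pvWalk only reads f at bp, bp-1, …, bp-(#nonspace-1)
lemma pvWalkCongr (tcs : List Char) (f f' : Int → Char) (bp : Int)
    (h : ∀ j : Nat, j < (tcs.filter (fun c => c ≠ ' ')).length → f (bp - j) = f' (bp - j)) :
    pvWalk f tcs bp = pvWalk f' tcs bp := by
  induction tcs generalizing bp with
  | nil => rfl
  | cons c r ih =>
    by_cases hc : c = ' '
    · have hl : ((c :: r).filter (fun x => x ≠ ' ')).length
          = ((r.filter (fun x => x ≠ ' ')).length) := by simp [hc]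
      simp only [pvWalk, if_pos hc]
      rw [ih bp (fun j hj => h j (by rw [hl]; exact hj))]
    · simp only [pvWalk, if_neg hc]
      have hlen : ((c :: r).filter (fun x => x ≠ ' ')).length
          = ((r.filter (fun x => x ≠ ' ')).length) + 1 := by simp [hc]
      have h0 : f bp = f' bp := by simpa using h 0 (by omega)
      rw [h0, ih (bp - 1) (by
        intro j hj
        have := h (j + 1) (by omega)
        simpa [sub_sub, add_comm] using this)]

-- one cons step of the slots computation, at any enumerate start
lemma pvEnumSlotsCons (c : Char) (r : List Char) (n : Int) :
    ((PySem.List.enumerate (c :: r) n).filter (fun q => q.2 ≠ ' ')).map Prod.fst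
      = if c = ' '
        then ((PySem.List.enumerate r (n + 1)).filter (fun q => q.2 ≠ ' ')).map Prod.fst
        else n :: ((PySem.List.enumerate r (n + 1)).filter (fun q => q.2 ≠ ' ')).map Prod.fst := by
  rw [PySem.List.enumerate_cons, List.filter_cons]
  by_cases hc : c = ' ' <;> simp [hc]

-- slots over an arbitrary enumerate start is the start-0 slots shifted
lemma pvSlotsShift (tcs : List Char) : ∀ (n : Int),
    ((PySem.List.enumerate tcs n).filter (fun q => q.2 ≠ ' ')).map Prod.fst
      = (pvSlots tcs).map (· + n) := by
  induction tcs with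
  | nil => intro n; simp [pvSlots, PySem.List.enumerate]
  | cons c r ih =>
    intro n
    rw [pvEnumSlotsCons, show pvSlots (c :: r)
        = ((PySem.List.enumerate (c :: r) 0).filter (fun q => q.2 ≠ ' ')).map Prod.fst from rfl,
      pvEnumSlotsCons, ih (n + 1), show (0 : Int) + 1 = 1 by ring, ih 1]
    by_cases hc : c = ' '
    · simp only [if_pos hc, List.map_map]
      apply List.map_congr_left
      intro x _
      simp only [Function.comp_apply]
      ring
    · simp only [if_neg hc, List.map_cons, List.map_map]
      congr 1
      · ring
      · apply List.map_congr_left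
        intro x _
        simp only [Function.comp_apply]
        ring

-- the cons equation for pvSlots itself
lemma pvSlotsCons (c : Char) (r : List Char) :
    pvSlots (c :: r)
      = if c = ' ' then (pvSlots r).map (· + 1) else 0 :: (pvSlots r).map (· + 1) := by
  rw [show pvSlots (c :: r)
      = ((PySem.List.enumerate (c :: r) 0).filter (fun q => q.2 ≠ ' ')).map Prod.fst from rfl,
    pvEnumSlotsCons, show (0 : Int) + 1 = 1 by ring, pvSlotsShift r 1]

-- entries of slots are the non-space template positions: nonnegative
lemma pvSlotsNonneg (tcs : List Char) : ∀ x ∈ pvSlots tcs, 0 ≤ x := by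
  intro x hx
  obtain ⟨⟨i, c⟩, hmem, rfl⟩ := List.mem_map.mp hx
  have := (List.mem_filter.mp hmem).1
  obtain ⟨k, hk, hp⟩ := (PySem.List.mem_enumerate_iff _ _ _).mp this
  simp at hp
  omega

lemma pvSlotsLength (tcs : List Char) :
    (pvSlots tcs).length = (tcs.filter (fun c => c ≠ ' ')).length := by
  induction tcs with
  | nil => simp [pvSlots, PySem.List.enumerate]
  | cons c r ih =>
    rw [pvSlotsCons, List.filter_cons]
    by_cases hc : c = ' ' <;> simp [hc, ih]

-- setting the r-th slot position of a pvWalk updates f at bit position bp - r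
lemma pvWalkSet (tcs : List Char) (f : Int → Char) (bit : Char) :
    ∀ (bp : Int) (r : Nat) (pos : Int), (pvSlots tcs)[r]? = some pos →
    (pvWalk f tcs bp).set pos.toNat bit
      = pvWalk (fun i => if i = bp - r then bit else f i) tcs bp := by
  induction tcs with
  | nil => intro bp r pos h; simp [pvSlots, PySem.List.enumerate] at h
  | cons c r' ih =>
    intro bp r pos h
    by_cases hc : c = ' '
    · -- pvSlots (' ' :: r') = (pvSlots r').map (· + 1)
      have hsl : pvSlots (c :: r') = (pvSlots r').map (· + 1) := by
        rw [pvSlotsCons, if_pos hc]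
      rw [hsl] at h
      rw [List.getElem?_map] at h
      obtain ⟨x, hx, rfl⟩ := Option.map_eq_some_iff.mp h
      have hx0 : 0 ≤ x := pvSlotsNonneg r' x (List.mem_of_getElem? hx)
      have ht : (x + 1).toNat = x.toNat + 1 := by omega
      simp only [pvWalk, if_pos hc, ht, List.set_cons_succ]
      rw [ih bp r x hx]
    · have hsl : pvSlots (c :: r') = 0 :: (pvSlots r').map (· + 1) := by
        rw [pvSlotsCons, if_neg hc]
      rw [hsl] at h
      match r with
      | 0 =>
        simp only [List.getElem?_cons_zero, Option.some_inj] at h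
        subst h
        simp only [pvWalk, if_neg hc, Int.toNat_zero, List.set_cons_zero]
        congr 1
        · simp
        · rw [pvWalkCongr r' f (fun i => if i = bp - (0 : Nat) then bit else f i) (bp - 1)
              (by intro j hj; beta_reduce; rw [if_neg (by push_cast; omega)])]
      | r'' + 1 =>
        simp only [List.getElem?_cons_succ, List.getElem?_map] at h
        obtain ⟨x, hx, rfl⟩ := Option.map_eq_some_iff.mp h
        have hx0 : 0 ≤ x := pvSlotsNonneg r' x (List.mem_of_getElem? hx)
        have ht : (x + 1).toNat = x.toNat + 1 := by omega
        simp only [pvWalk, if_neg hc, ht, List.set_cons_succ]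
        congr 1
        · rw [if_neg (by push_cast; omega)]
        · rw [ih (bp - 1) r'' x hx]
          apply pvWalkCongr
          intro j hj
          beta_reduce
          by_cases he : bp - 1 - (j : Int) = bp - 1 - ((r'' : Nat) : Int)
          · rw [if_pos he, if_pos (by push_cast at he ⊢; omega)]
          · rw [if_neg he, if_neg (by push_cast at he ⊢; omega)]

-- the whole scatter fold from the skeleton, abstractly
lemma pvScatter (tcs : List Char) :
    ∀ (ps : List (Int × Char)) (g : Int → Char),
    ps.foldl
      (fun out q =>
        if 0 ≤ q.1 ∧ q.1 < ((pvSlots tcs).length : Int) then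
          PySem.List.pySetD out
            (PySem.List.pyGetD (pvSlots tcs) (((pvSlots tcs).length : Int) - 1 - q.1) 0) q.2
        else out)
      (pvWalk g tcs (((pvSlots tcs).length : Int) - 1))
    = pvWalk
        (ps.foldl (fun g q => fun i => if i = q.1 then q.2 else g i) g)
        tcs (((pvSlots tcs).length : Int) - 1) := by
  intro ps
  induction ps with
  | nil => intro g; rfl
  | cons q ps' ih =>
    intro g
    simp only [List.foldl_cons]
    by_cases hq : 0 ≤ q.1 ∧ q.1 < ((pvSlots tcs).length : Int)
    · rw [if_pos hq]
      have hj0 : 0 ≤ ((pvSlots tcs).length : Int) - 1 - q.1 := by omega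
      have hjlt : (((pvSlots tcs).length : Int) - 1 - q.1).toNat < (pvSlots tcs).length := by
        omega
      have hget : PySem.List.pyGetD (pvSlots tcs) (((pvSlots tcs).length : Int) - 1 - q.1) 0
          = (pvSlots tcs)[(((pvSlots tcs).length : Int) - 1 - q.1).toNat]'hjlt := by
        rw [PySem.List.pyGetD_of_nonneg _ _ hj0, List.getD_eq_getElem _ _ hjlt]
      set j : Nat := (((pvSlots tcs).length : Int) - 1 - q.1).toNat with hjdef
      set pos : Int := (pvSlots tcs)[j]'hjlt with hpos
      have hpos0 : 0 ≤ pos := pvSlotsNonneg tcs pos (List.getElem_mem hjlt)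
      rw [hget, PySem.List.pySetD_of_nonneg _ _ hpos0]
      rw [pvWalkSet tcs g q.2 (((pvSlots tcs).length : Int) - 1) j pos
            (List.getElem?_eq_getElem hjlt)]
      have hbp : (fun i => if i = ((pvSlots tcs).length : Int) - 1 - (j : Int) then q.2 else g i)
          = (fun i => if i = q.1 then q.2 else g i) := by
        funext i
        have : ((pvSlots tcs).length : Int) - 1 - (j : Int) = q.1 := by omega
        rw [this]
      rw [hbp, ih]
    · rw [if_neg hq]
      rw [pvWalkCongr tcs g (fun i => if i = q.1 then q.2 else g i)
            (((pvSlots tcs).length : Int) - 1)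
            (by
              intro k hk
              rw [← pvSlotsLength tcs] at hk
              have : ¬ (((pvSlots tcs).length : Int) - 1 - (k : Int) = q.1) := by omega
              simp [this])]
      exact ih _

-- dict(zip(...)) lookup is the fold of pointwise updates (last pair wins)
lemma pvDictFold : ∀ (ps : List (Int × Char)) (d : PySem.Dict Int Char) (g : Int → Char),
    (∀ i, d.getD i '_' = g i) →
    ∀ i, ((ps.foldl (fun acc p => acc.insert p.1 p.2) d).getD i '_')
      = (ps.foldl (fun g q => fun i => if i = q.1 then q.2 else g i) g) i := by
  intro ps
  induction ps with
  | nil => intro d g h i; exact h i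
  | cons q r ih =>
    intro d g h i
    simp only [List.foldl_cons]
    exact ih _ _ (fun j => by rw [PySem.Dict.getD_insert]; by_cases hj : j = q.1 <;> simp [hj, h]) i

-- the per-key strings of the two ports agree
lemma pvKeyEq (tpl : String) (ps : List (Int × Char)) :
    (PySem.List.enumerate tpl.toList 0).foldl
        (fun cb (q : Int × Char) =>
          if q.2 = ' ' then
            PySem.List.slice cb none (some q.1) ++ ' ' :: PySem.List.slice cb (some q.1) none
          else cb)
        (((PySem.List.pyRange 0 (PySem.Str.len (PySem.Str.replace tpl " " "")) 1).map
            (fun index => if (PySem.Dict.ofList ps).contains index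
              then (PySem.Dict.ofList ps).getD index '_' else '_')).reverse)
      = ps.foldl
          (fun out q =>
            if 0 ≤ q.1 ∧ q.1 < ((pvSlots tpl.toList).length : Int) then
              PySem.List.pySetD out
                (PySem.List.pyGetD (pvSlots tpl.toList) (((pvSlots tpl.toList).length : Int) - 1 - q.1) 0) q.2
            else out)
          (tpl.toList.map (fun ch => if ch = ' ' then ' ' else '_')) := by
  rw [pvAKey, pvSkeleton tpl.toList (((pvSlots tpl.toList).length : Int) - 1), pvScatter]
  rw [show ((pvSlots tpl.toList).length : Int)
        = ((tpl.toList.filter (fun c => c ≠ ' ')).length : Int) by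
      exact_mod_cast congrArg Nat.cast (pvSlotsLength tpl.toList)]
  apply pvWalkCongr
  intro j hj
  exact pvDictFold ps PySem.Dict.empty (fun _ => '_') (fun i => by simp) _

-- ===== VERDICT (by name: the statement is the Claim_ definition above) =====
theorem format_marginal_py_spec : Claim_equal_format_marginal_py := by
  intro counts marg_counts indices _ hpre
  unfold Spec_format_marginal_py format_marginal_py format_marginal_py_alt
  match counts with
  | [] => exact absurd rfl hpre
  | (tpl, v) :: rest =>
    simp only
    congr 1
    congr 1
    funext fc p
    congr 2
    exact pvKeyEq tpl ((PySem.List.sorted indices (fun x => x) true).zip p.1.toList)
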